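-- pv_equiv track=rewrite | github.com/daniel-reich/turbo-robot | iMRN9YGK4mcYja9rY_10.py | accumulating_product
-- ===== SOURCE A (Python) =====
-- def accumulating_product(lst):
--     other = []
--     for i in range(len(lst)):
--         if i == 0:
--             other.append(lst[0])
--         else:
--             prod = lst[:i+1]
--             val = 1
--             for j in prod:
--                 val*=j
--             other.append(val)
--     return (other)
-- ===== SOURCE B (Python) =====
-- def accumulating_product(lst):
--     out = []
--     p = 1
--     for x in lst:
--         p *= x
--         out.append(p)
--     return out
-- ===== Notes on version B (the rewrite author's own statement) =====
-- stated objective: faster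
-- what changed: replaces the per-index slice-and-reproduct (quadratic) with a single pass carrying a running product accumulator
import Mathlib
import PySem

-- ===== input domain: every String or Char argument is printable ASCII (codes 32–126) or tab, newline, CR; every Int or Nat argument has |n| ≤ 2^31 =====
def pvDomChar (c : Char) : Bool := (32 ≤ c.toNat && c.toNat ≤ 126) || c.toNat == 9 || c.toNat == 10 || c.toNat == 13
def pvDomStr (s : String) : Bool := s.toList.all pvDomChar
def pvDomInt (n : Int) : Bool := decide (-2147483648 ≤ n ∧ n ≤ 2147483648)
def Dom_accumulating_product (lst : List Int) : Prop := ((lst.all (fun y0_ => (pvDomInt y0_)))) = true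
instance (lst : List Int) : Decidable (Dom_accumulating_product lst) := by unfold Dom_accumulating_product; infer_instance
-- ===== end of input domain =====

-- B replaces A's per-index slice-and-reproduct (quadratic) with one pass keeping a running product.

-- ===== PORT A =====
-- lst[0] at i == 0 is always in range there (the range is nonempty), so pyGetD's default is never used
def accumulating_product (lst : List Int) : List Int :=
  (PySem.List.pyRange 0 lst.length 1).foldl
    (fun other i =>
      if i = 0 then other ++ [PySem.List.pyGetD lst 0 0]
      else
        other ++ [(PySem.List.slice lst none (some (i + 1))).foldl (fun val j => val * j) 1])
    []

-- ===== PORT B =====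
def apGo (p : Int) : List Int → List Int
  | [] => []
  | x :: xs => (p * x) :: apGo (p * x) xs

def accumulating_product_alt (lst : List Int) : List Int := apGo 1 lst

-- ===== PRECONDITION & SPEC =====
def Spec_accumulating_product (lst : List Int) (out : List Int) : Prop := out = accumulating_product_alt lst
instance (lst : List Int) (out : List Int) : Decidable (Spec_accumulating_product lst out) := by unfold Spec_accumulating_product; infer_instance

-- ===== CLAIM (what is proved, stated in full; the proofs are below) =====
def Claim_equal_accumulating_product : Prop := ∀ (lst : List Int), Dom_accumulating_product lst → Spec_accumulating_product lst (accumulating_product lst)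

-- ===== LEMMAS AND PROOFS =====

theorem apGo_eq_map (lst : List Int) (p : Int) :
    apGo p lst = (List.range lst.length).map (fun k => p * (lst.take (k + 1)).prod) := by
  induction lst generalizing p with
  | nil => simp [apGo]
  | cons x xs ih =>
    simp only [apGo, List.length_cons, List.range_succ_eq_map, List.map_cons, List.map_map]
    congr 1
    · simp
    · rw [ih (p * x)]
      apply List.map_congr_left
      intro k _
      simp [List.prod_cons, mul_assoc]

theorem accumulating_product_eq_map (lst : List Int) :
    accumulating_product lst = (List.range lst.length).map (fun k => (lst.take (k + 1)).prod) := by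
  unfold accumulating_product
  rw [PySem.List.pyRange_zero_natCast, List.foldl_map]
  have hfun : (fun (other : List Int) (k : Nat) =>
      if (k : Int) = 0 then other ++ [PySem.List.pyGetD lst 0 0]
      else other ++ [(PySem.List.slice lst none (some ((k : Int) + 1))).foldl (fun val j => val * j) 1])
      = fun (other : List Int) (k : Nat) => other ++
        [if (k : Int) = 0 then PySem.List.pyGetD lst 0 0
         else (PySem.List.slice lst none (some ((k : Int) + 1))).foldl (fun val j => val * j) 1] := by
    funext other k; split_ifs <;> rfl
  rw [hfun, PySem.List.foldl_append_singleton_eq_map]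
  apply List.map_congr_left
  intro k hk
  by_cases h0 : k = 0
  · subst h0
    simp only [Nat.cast_zero, reduceIte]
    cases lst with
    | nil => simp at hk
    | cons x xs => simp [PySem.List.pyGetD_zero_cons]
  · have hcast : (k : Int) ≠ 0 := by exact_mod_cast h0
    rw [if_neg hcast]
    have h1 : (k : Int) + 1 = ((k + 1 : Nat) : Int) := by push_cast; ring
    rw [h1, PySem.List.slice_to_natCast, ← List.prod_eq_foldl]

theorem accumulating_product_spec_aux (lst : List Int) :
    accumulating_product lst = accumulating_product_alt lst := by
  rw [accumulating_product_eq_map]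
  unfold accumulating_product_alt
  rw [apGo_eq_map]
  simp

-- ===== VERDICT (by name: the statement is the Claim_ definition above) =====
theorem accumulating_product_spec : Claim_equal_accumulating_product := by
  intro lst _
  exact accumulating_product_spec_aux lst
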